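-- pv_equiv track=rewrite | github.com/NicoCathare/MotCroise | backend/server.py | _find_letter_groups_in_col
-- ===== SOURCE A (Python) =====
-- from typing import List, Optional, Dict, Any
--
-- def _find_letter_groups_in_col(grid: List[List[str]], col: int, rows: int) -> List[Dict]:
--     """Find groups of consecutive letters (no empty, no #) in a column."""
--     groups = []
--     start = None
--     for r in range(rows):
--         cell = grid[r][col]
--         if cell != "" and cell != "#":
--             if start is None:
--                 start = r
--         else:
--             if start is not None:
--                 length = r - start
--                 if length >= 3:
--                     groups.append({"start": start, "length": length})
--                 start = None
--     # Don't forget trailing group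
--     if start is not None:
--         length = rows - start
--         if length >= 3:
--             groups.append({"start": start, "length": length})
--     return groups
-- ===== SOURCE B (Python) =====
-- def _find_letter_groups_in_col(grid, col, rows):
--     """Find groups of consecutive letters (no empty, no #) in a column."""
--     flags = [grid[r][col] != "" and grid[r][col] != "#" for r in range(rows)]
--     n = len(flags)
--     groups = []
--     i = 0
--     while i < n:
--         j = i
--         while j < n and flags[j] == flags[i]:
--             j += 1
--         if flags[i] and j - i >= 3:
--             groups.append({"start": i, "length": j - i})
--         i = j
--     return groups
-- ===== Notes on version B (the rewrite author's own statement) =====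
-- stated objective: simpler
-- what changed: B precomputes the column's validity flags and groups consecutive equal flags run-by-run (two-index run scan), replacing A's start=None sentinel state and its separate trailing-group block.
import Mathlib
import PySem

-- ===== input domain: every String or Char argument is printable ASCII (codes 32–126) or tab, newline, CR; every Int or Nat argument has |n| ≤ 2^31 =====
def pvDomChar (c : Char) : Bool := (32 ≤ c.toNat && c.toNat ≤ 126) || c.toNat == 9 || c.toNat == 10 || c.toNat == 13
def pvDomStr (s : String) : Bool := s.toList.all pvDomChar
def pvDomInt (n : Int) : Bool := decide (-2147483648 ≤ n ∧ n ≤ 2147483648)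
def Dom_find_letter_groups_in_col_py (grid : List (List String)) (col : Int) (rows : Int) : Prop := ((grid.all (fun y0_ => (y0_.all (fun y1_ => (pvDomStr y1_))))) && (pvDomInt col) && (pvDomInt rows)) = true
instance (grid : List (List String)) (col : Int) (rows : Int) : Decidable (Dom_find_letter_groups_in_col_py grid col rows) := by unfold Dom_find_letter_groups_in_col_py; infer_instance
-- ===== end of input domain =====

-- B replaces A's start=None sentinel loop (with its separate trailing-group step) by
-- precomputing the column's validity flags and grouping consecutive equal flags run by run.


-- ===== PORT A =====
-- cell = grid[r][col]; the defaults are never hit on inputs satisfying Pre_ (no IndexError)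
def pvCell (grid : List (List String)) (col : Int) (r : Int) : String :=
  (PySem.List.pyGet? ((PySem.List.pyGet? grid r).getD []) col).getD ""

-- the body of A's `for r in range(rows)` loop; state = (groups, start)
def pvStepA (grid : List (List String)) (col : Int)
    (st : List (List (String × Int)) × Option Int) (r : Int) :
    List (List (String × Int)) × Option Int :=
  let cell := pvCell grid col r
  if cell ≠ "" ∧ cell ≠ "#" then
    match st with
    | (groups, none)   => (groups, some r)
    | (groups, some s) => (groups, some s)
  else
    match st with
    | (groups, some s) =>
        (if r - s ≥ 3 then groups ++ [[("start", s), ("length", r - s)]] else groups, none)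
    | (groups, none)   => (groups, none)

-- A's trailing-group block after the loop
def pvFinishA (e : Int) (st : List (List (String × Int)) × Option Int) :
    List (List (String × Int)) :=
  match st with
  | (groups, some s) =>
      if e - s ≥ 3 then groups ++ [[("start", s), ("length", e - s)]] else groups
  | (groups, none) => groups

def find_letter_groups_in_col_py (grid : List (List String)) (col : Int) (rows : Int) :
    List (List (String × Int)) :=
  pvFinishA rows ((PySem.List.pyRange 0 rows 1).foldl (pvStepA grid col) ([], none))

-- ===== PORT B =====
-- flag of one cell: grid[r][col] != "" and grid[r][col] != "#"
def pvFlagB (grid : List (List String)) (col : Int) (r : Int) : Bool :=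
  decide (pvCell grid col r ≠ "") && decide (pvCell grid col r ≠ "#")

-- B's run scan: take the maximal run of flags equal to the head, emit it if valid and long
-- enough, continue after the run with the row index advanced by the run length.
def pvRunsB : List Bool → Int → List (List (String × Int))
  | [], _ => []
  | b :: rest, i =>
      let run := (b :: rest).takeWhile (fun x => x == b)
      let tail := (b :: rest).dropWhile (fun x => x == b)
      (if b = true ∧ (run.length : Int) ≥ 3 then
          [[("start", i), ("length", (run.length : Int))]]
        else []) ++ pvRunsB tail (i + run.length)
  termination_by fs _ => fs.length
  decreasing_by
    simp
    have := List.length_dropWhile_le (fun x => x == b) rest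
    omega

def find_letter_groups_in_col_py_alt (grid : List (List String)) (col : Int) (rows : Int) :
    List (List (String × Int)) :=
  pvRunsB ((PySem.List.pyRange 0 rows 1).map (pvFlagB grid col)) 0

-- ===== PRECONDITION & SPEC =====
-- Pre_ excludes exactly the inputs on which A raises IndexError: a row index below `rows`
-- outside the grid, or a column index out of range of one of the first `rows` rows.
def Pre_find_letter_groups_in_col_py (grid : List (List String)) (col : Int) (rows : Int) : Prop :=
  rows ≤ (grid.length : Int) ∧
  ∀ row ∈ grid.take rows.toNat, PySem.Raise.InRange row.length col

instance (grid : List (List String)) (col : Int) (rows : Int) :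
    Decidable (Pre_find_letter_groups_in_col_py grid col rows) := by
  unfold Pre_find_letter_groups_in_col_py; infer_instance

def pvWitness_find_letter_groups_in_col_py : List (List String) × Int × Int :=
  ([["a"], ["b"], ["#"], ["c"]], 0, 4)

def Spec_find_letter_groups_in_col_py (grid : List (List String)) (col : Int) (rows : Int) (out : List (List (String × Int))) : Prop := out = find_letter_groups_in_col_py_alt grid col rows
instance (grid : List (List String)) (col : Int) (rows : Int) (out : List (List (String × Int))) : Decidable (Spec_find_letter_groups_in_col_py grid col rows out) := by unfold Spec_find_letter_groups_in_col_py; infer_instance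

-- ===== CLAIM (what is proved, stated in full; the proofs are below) =====
def Claim_equal_find_letter_groups_in_col_py : Prop := ∀ (grid : List (List String)) (col : Int) (rows : Int), Dom_find_letter_groups_in_col_py grid col rows → Pre_find_letter_groups_in_col_py grid col rows → Spec_find_letter_groups_in_col_py grid col rows (find_letter_groups_in_col_py grid col rows)

-- ===== LEMMAS AND PROOFS =====

theorem pvRunsB_nil (i : Int) : pvRunsB [] i = [] := by rw [pvRunsB.eq_def]

theorem pvRunsB_cons (b : Bool) (rest : List Bool) (i : Int) :
    pvRunsB (b :: rest) i =
      (if b = true ∧ (((b :: rest).takeWhile (fun x => x == b)).length : Int) ≥ 3 then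
          [[("start", i), ("length", (((b :: rest).takeWhile (fun x => x == b)).length : Int))]]
        else []) ++ pvRunsB ((b :: rest).dropWhile (fun x => x == b))
          (i + ((b :: rest).takeWhile (fun x => x == b)).length) := by
  rw [pvRunsB.eq_def]

-- one loop step of A, rephrased on the precomputed flag
def pvStep1 : Bool → Int → (List (List (String × Int)) × Option Int) →
    (List (List (String × Int)) × Option Int)
  | true, i, (groups, none)   => (groups, some i)
  | true, _, (groups, some s) => (groups, some s)
  | false, i, (groups, some s) =>
      (if i - s ≥ 3 then groups ++ [[("start", s), ("length", i - s)]] else groups, none)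
  | false, _, (groups, none)  => (groups, none)

-- A's loop, consuming the precomputed flag list while tracking the row index
def pvGo : List Bool → Int → (List (List (String × Int)) × Option Int) →
    (List (List (String × Int)) × Option Int)
  | [], _, st => st
  | b :: bs, i, st => pvGo bs (i + 1) (pvStep1 b i st)

theorem pvStepA_eq (grid : List (List String)) (col : Int)
    (st : List (List (String × Int)) × Option Int) (r : Int) :
    pvStepA grid col st r = pvStep1 (pvFlagB grid col r) r st := by
  obtain ⟨g, so⟩ := st
  unfold pvStepA pvFlagB
  by_cases h1 : pvCell grid col r ≠ ""
  · by_cases h2 : pvCell grid col r ≠ "#" <;> cases so <;> simp [h1, h2, pvStep1]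
  · cases so <;> simp [h1, pvStep1]

theorem pvBridge (grid : List (List String)) (col : Int) :
    ∀ (n : Nat) (i : Int) (st : List (List (String × Int)) × Option Int),
      (PySem.List.pyRange i (i + n) 1).foldl (pvStepA grid col) st
        = pvGo ((PySem.List.pyRange i (i + n) 1).map (pvFlagB grid col)) i st := by
  intro n
  induction n with
  | zero =>
      intro i st
      rw [PySem.List.pyRange_one_eq_nil (by omega : i + ((0:Nat):Int) ≤ i)]
      simp [pvGo]
  | succ m ih =>
      intro i st
      have hlt : i < i + ((m + 1 : Nat) : Int) := by push_cast; omega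
      rw [PySem.List.pyRange_one_cons hlt]
      have h2 : i + ((m + 1 : Nat) : Int) = (i + 1) + ((m : Nat) : Int) := by push_cast; ring
      simp only [List.foldl_cons, List.map_cons, pvGo, h2, ih, pvStepA_eq]

theorem pvRunsB_false_cons (rest : List Bool) (i : Int) :
    pvRunsB (false :: rest) i = pvRunsB rest (i + 1) := by
  match rest with
  | [] => simp [pvRunsB_cons, pvRunsB_nil]
  | true :: r2 =>
      rw [pvRunsB_cons]
      simp
  | false :: r2 =>
      rw [pvRunsB_cons false (false :: r2) i, pvRunsB_cons false r2 (i + 1)]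
      simp
      congr 1
      ring

theorem pvRunsB_replicate (k : Nat) (hk : 1 ≤ k) (s : Int) :
    pvRunsB (List.replicate k true) s
      = if (k : Int) ≥ 3 then [[("start", s), ("length", (k : Int))]] else [] := by
  obtain ⟨m, rfl⟩ : ∃ m, k = m + 1 := ⟨k - 1, by omega⟩
  rw [List.replicate_succ, pvRunsB_cons]
  have h1 : (true :: List.replicate m true).takeWhile (fun x => x == true)
      = List.replicate (m + 1) true := by
    simp [List.replicate_succ]
  have h2 : (true :: List.replicate m true).dropWhile (fun x => x == true) = [] := by
    simp
  rw [h1, h2, pvRunsB_nil]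
  simp

theorem pvRunsB_rep_false (k : Nat) (hk : 1 ≤ k) (s : Int) (rest : List Bool) :
    pvRunsB (List.replicate k true ++ false :: rest) s
      = (if (k : Int) ≥ 3 then [[("start", s), ("length", (k : Int))]] else [])
          ++ pvRunsB rest (s + k + 1) := by
  obtain ⟨m, rfl⟩ : ∃ m, k = m + 1 := ⟨k - 1, by omega⟩
  rw [List.replicate_succ, List.cons_append, pvRunsB_cons]
  have h1 : (true :: (List.replicate m true ++ false :: rest)).takeWhile (fun x => x == true)
      = List.replicate (m + 1) true := by
    simp [List.replicate_succ]
  have h2 : (true :: (List.replicate m true ++ false :: rest)).dropWhile (fun x => x == true)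
      = false :: rest := by
    simp
  rw [h1, h2, pvRunsB_false_cons]
  simp only [List.length_replicate]
  simp

theorem pvMain (fs : List Bool) :
    ∀ (i : Int) (acc : List (List (String × Int))),
      (pvFinishA (i + fs.length) (pvGo fs i (acc, none)) = acc ++ pvRunsB fs i)
      ∧ ∀ (s : Int), s + 1 ≤ i →
          pvFinishA (i + fs.length) (pvGo fs i (acc, some s))
            = acc ++ pvRunsB (List.replicate (i - s).toNat true ++ fs) s := by
  induction fs with
  | nil =>
      intro i acc
      constructor
      · simp [pvGo, pvFinishA, pvRunsB_nil]
      · intro s hs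
        simp only [pvGo, pvFinishA, List.length_nil, Int.natCast_zero, add_zero,
          List.append_nil]
        rw [pvRunsB_replicate (i - s).toNat (by omega) s]
        have h1 : ((i - s).toNat : Int) = i - s := by omega
        rw [h1]
        split_ifs <;> simp
  | cons b rest ih =>
      intro i acc
      have hlen : i + ((b :: rest).length : Int) = (i + 1) + (rest.length : Int) := by
        push_cast [List.length_cons]; ring
      constructor
      · cases b with
        | true =>
            have h := (ih (i + 1) acc).2 i (by omega)
            simp only [pvGo, pvStep1, hlen]
            rw [h]
            simp
        | false =>
            have h := (ih (i + 1) acc).1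
            simp only [pvGo, pvStep1, hlen]
            rw [h, pvRunsB_false_cons]
      · intro s hs
        cases b with
        | true =>
            have h := (ih (i + 1) acc).2 s (by omega)
            simp only [pvGo, pvStep1, hlen]
            rw [h]
            have h1 : (i + 1 - s).toNat = (i - s).toNat + 1 := by omega
            rw [h1, List.replicate_succ', List.append_assoc, List.singleton_append]
        | false =>
            have h := (ih (i + 1)
              (if i - s ≥ 3 then acc ++ [[("start", s), ("length", i - s)]] else acc)).1
            simp only [pvGo, pvStep1, hlen]
            rw [h, pvRunsB_rep_false (i - s).toNat (by omega) s rest]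
            have h1 : ((i - s).toNat : Int) = i - s := by omega
            rw [h1]
            have h2 : s + (i - s) + 1 = i + 1 := by ring
            rw [h2]
            split_ifs <;> simp

theorem pvPorts_eq (grid : List (List String)) (col : Int) (rows : Int) :
    find_letter_groups_in_col_py grid col rows
      = find_letter_groups_in_col_py_alt grid col rows := by
  unfold find_letter_groups_in_col_py find_letter_groups_in_col_py_alt
  by_cases hr : rows ≤ 0
  · rw [PySem.List.pyRange_one_eq_nil hr]
    simp [pvFinishA, pvRunsB_nil]
  · have hb := pvBridge grid col rows.toNat 0 ([], none)
    rw [show (0 : Int) + (rows.toNat : Int) = rows by omega] at hb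
    rw [hb]
    have hm := (pvMain ((PySem.List.pyRange 0 rows 1).map (pvFlagB grid col)) 0 []).1
    have hl : (((PySem.List.pyRange 0 rows 1).map (pvFlagB grid col)).length : Int) = rows := by
      simp [PySem.List.length_pyRange_one]; omega
    rw [zero_add, hl] at hm
    rw [hm, List.nil_append]

-- ===== VERDICT (by name: the statement is the Claim_ definition above) =====
theorem find_letter_groups_in_col_py_spec : Claim_equal_find_letter_groups_in_col_py := by
  intro grid col rows _ _
  unfold Spec_find_letter_groups_in_col_py
  exact pvPorts_eq grid col rows
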